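-- pv_equiv track=rewrite | github.com/jaysonjeg/PCNS_analysis | acface_utils.py | find_duplicate_indices
-- ===== SOURCE A (Python) =====
-- def find_duplicate_indices(lst):
--     #In list lst, for each item that appears more than once, return the indices of all its appearances after the first appearance
--     seen = set()
--     duplicate_indices = []
--     for index, item in enumerate(lst):
--         if item in seen:
--             duplicate_indices.append(index)
--         else:
--             seen.add(item)
--     return duplicate_indices
-- ===== SOURCE B (Python) =====
-- def find_duplicate_indices(lst):
--     # Two passes: first build a dict mapping each value to the index of its
--     # first appearance, then keep every index that is not its value's first.
--     first = {}
--     for index, item in enumerate(lst):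
--         first.setdefault(item, index)
--     return [index for index, item in enumerate(lst) if first[item] != index]
-- ===== Notes on version B (the rewrite author's own statement) =====
-- stated objective: alternative
-- what changed: Replaces A's single pass with a 'seen' set and duplicate accumulator by two passes over a value-to-first-index dict: build the dict with setdefault, then keep each index that differs from its value's first index.
import Mathlib
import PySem

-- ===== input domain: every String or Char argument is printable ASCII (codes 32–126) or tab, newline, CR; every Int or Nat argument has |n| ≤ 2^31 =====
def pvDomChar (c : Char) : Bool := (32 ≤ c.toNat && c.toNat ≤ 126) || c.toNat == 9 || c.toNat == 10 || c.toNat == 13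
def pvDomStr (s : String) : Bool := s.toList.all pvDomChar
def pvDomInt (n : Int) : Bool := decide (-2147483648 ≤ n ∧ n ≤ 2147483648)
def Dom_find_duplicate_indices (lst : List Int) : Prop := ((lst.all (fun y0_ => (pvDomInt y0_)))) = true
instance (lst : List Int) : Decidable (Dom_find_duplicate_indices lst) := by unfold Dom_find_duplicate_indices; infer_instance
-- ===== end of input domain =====

-- B replaces A's stateful seen-set loop with two passes over a value-to-first-index dict (alternative decomposition; same cost).


-- ===== PORT A =====
-- for index, item in enumerate(lst): if item in seen: append index else: seen.add(item)
def find_duplicate_indices (lst : List Int) : List Int :=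
  let st := (PySem.List.enumerate lst 0).foldl
    (fun (st : PySem.Set Int × List Int) p =>
      if PySem.Set.contains st.1 p.2 then (st.1, st.2 ++ [p.1])
      else (PySem.Set.add st.1 p.2, st.2))
    (PySem.Set.empty, [])
  st.2

-- ===== PORT B =====
-- first = {}; for index, item in enumerate(lst): first.setdefault(item, index)
-- return [index for index, item in enumerate(lst) if first[item] != index]
def find_duplicate_indices_alt (lst : List Int) : List Int :=
  let first := (PySem.List.enumerate lst 0).foldl
    (fun (d : PySem.Dict Int Int) p => d.setdefault p.2 p.1) PySem.Dict.empty
  ((PySem.List.enumerate lst 0).filter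
    (fun p => match first.get? p.2 with
      | some j => decide (j ≠ p.1)   -- first[item] != index
      | none => false)).map (·.1)    -- KeyError unreachable: every item was setdefault'ed in the first pass

-- ===== PRECONDITION & SPEC =====
def Spec_find_duplicate_indices (lst : List Int) (out : List Int) : Prop := out = find_duplicate_indices_alt lst
instance (lst : List Int) (out : List Int) : Decidable (Spec_find_duplicate_indices lst out) := by unfold Spec_find_duplicate_indices; infer_instance

-- ===== CLAIM (what is proved, stated in full; the proofs are below) =====
def Claim_equal_find_duplicate_indices : Prop := ∀ (lst : List Int), Dom_find_duplicate_indices lst → Spec_find_duplicate_indices lst (find_duplicate_indices lst)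

-- ===== LEMMAS AND PROOFS =====

-- A-side: invariant — the seen set holds exactly the elements of the processed prefix.
theorem fdi_foldl_eq (rest : List Int) : ∀ (pre : List Int) (s : PySem.Set Int) (acc : List Int),
    (∀ y, PySem.Set.contains s y = decide (y ∈ pre)) →
    ((PySem.List.enumerate rest (pre.length : Int)).foldl
      (fun (st : PySem.Set Int × List Int) p =>
        if PySem.Set.contains st.1 p.2 then (st.1, st.2 ++ [p.1])
        else (PySem.Set.add st.1 p.2, st.2))
      (s, acc)).2
    = acc ++ ((PySem.List.enumerate rest (pre.length : Int)).filter
        (fun p => decide (p.2 ∈ pre ++ PySem.List.slice rest none (some (p.1 - pre.length))))).map (·.1) := by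
  induction rest with
  | nil => intro pre s acc _; simp [PySem.List.enumerate]
  | cons x xs ih =>
    intro pre s acc hs
    rw [PySem.List.enumerate_cons]
    simp only [List.foldl_cons, List.filter_cons]
    have hpre : (pre ++ [x]).length = pre.length + 1 := by simp
    have hcast : ((pre.length : Int) + 1) = (((pre ++ [x]).length : Int)) := by
      simp
    -- the head's condition
    have hslice0 : PySem.List.slice (x :: xs) none (some ((pre.length : Int) - pre.length)) = [] := by
      rw [show ((pre.length : Int) - pre.length) = (((0:Nat) : Int)) by simp,
        PySem.List.slice_to_natCast]
      simp
    -- rewrite the tail's condition: prefix grows by x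
    have htail : ∀ (p : Int × Int), p ∈ PySem.List.enumerate xs ((pre.length : Int) + 1) →
        (decide (p.2 ∈ pre ++ PySem.List.slice (x :: xs) none (some (p.1 - pre.length))))
        = (decide (p.2 ∈ (pre ++ [x]) ++ PySem.List.slice xs none (some (p.1 - (pre ++ [x]).length)))) := by
      intro p hp
      rcases (PySem.List.mem_enumerate_iff _ _ _).1 hp with ⟨k, hk, rfl⟩
      have h1 : ((pre.length : Int) + 1 + k) - pre.length = ((k + 1 : Nat) : Int) := by push_cast; ring
      have h2 : ((pre.length : Int) + 1 + k) - ((pre ++ [x]).length : Int) = ((k : Nat) : Int) := by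
        rw [hpre]; push_cast; ring
      rw [h1, h2, PySem.List.slice_to_natCast, PySem.List.slice_to_natCast]
      simp [List.take_succ_cons, List.append_assoc]
    by_cases hx : x ∈ pre
    · have hc : PySem.Set.contains s x = true := by rw [hs]; simpa
      rw [if_pos hc]
      have hinv' : ∀ y, PySem.Set.contains s y = decide (y ∈ pre ++ [x]) := by
        intro y; rw [hs]; by_cases h : y = x <;> simp [h, hx]
      have hcond : (decide (x ∈ pre ++ PySem.List.slice (x :: xs) none (some ((pre.length : Int) - pre.length)))) = true := by
        rw [hslice0]; simpa
      rw [if_pos hcond, List.filter_congr htail, hcast,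
        ih (pre ++ [x]) s (acc ++ [(pre.length : Int)]) hinv']
      simp
    · have hc : PySem.Set.contains s x = false := by rw [hs]; simpa
      rw [if_neg (by rw [hc]; exact Bool.false_ne_true)]
      have hinv' : ∀ y, PySem.Set.contains (PySem.Set.add s x) y = decide (y ∈ pre ++ [x]) := by
        intro y
        have hsy := hs y
        by_cases h : y = x
        · simp [PySem.Set.contains, PySem.Set.mem_add, h]
        · simp [PySem.Set.contains, PySem.Set.mem_add, h] at hsy ⊢
          exact hsy
      have hcond : (decide (x ∈ pre ++ PySem.List.slice (x :: xs) none (some ((pre.length : Int) - pre.length)))) = false := by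
        rw [hslice0]; simpa
      rw [if_neg (by rw [hcond]; exact Bool.false_ne_true), List.filter_congr htail, hcast,
        ih (pre ++ [x]) (PySem.Set.add s x) acc hinv']

-- B-side: the setdefault fold records each value's FIRST index.
theorem fdi_get?_setdefault_fold (rest : List Int) : ∀ (s : Int) (d : PySem.Dict Int Int) (x : Int),
    ((PySem.List.enumerate rest s).foldl
      (fun (d : PySem.Dict Int Int) p => d.setdefault p.2 p.1) d).get? x
    = match d.get? x with
      | some v => some v
      | none => (PySem.List.index? rest x).map (fun k => s + (k : Int)) := by
  induction rest with
  | nil => intro s d x; cases h : d.get? x <;> simp [PySem.List.enumerate, h]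
  | cons y ys ih =>
    intro s d x
    rw [PySem.List.enumerate_cons]
    simp only [List.foldl_cons]
    rw [ih]
    by_cases hxy : x = y
    · rw [hxy]
      rw [PySem.Dict.get?_setdefault_self d y s]
      cases h : d.get? y with
      | some v => simp
      | none =>
        rw [PySem.List.index?_cons_self]
        simp
    · rw [PySem.Dict.get?_setdefault_of_ne d s hxy]
      cases h : d.get? x with
      | some v => simp
      | none =>
        rw [PySem.List.index?_cons_of_ne ys (fun he => hxy he.symm)]
        cases hi : PySem.List.index? ys x
        · simp
        · simp
          ring

-- B-side: "first index ≠ i" is exactly "appears in the prefix before i".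
theorem fdi_cond_eq (lst : List Int) (i : Nat) (hi : i < lst.length) :
    (match ((PySem.List.enumerate lst 0).foldl
        (fun (d : PySem.Dict Int Int) p => d.setdefault p.2 p.1) PySem.Dict.empty).get? lst[i] with
      | some j => decide (j ≠ ((i : Nat) : Int))
      | none => false)
    = decide (lst[i] ∈ lst.take i) := by
  have hmem : lst[i] ∈ lst := List.getElem_mem hi
  rcases (PySem.List.index?_isSome_iff lst lst[i]).2 hmem |> Option.isSome_iff_exists.1 with ⟨j, hj⟩
  rcases PySem.List.getElem_of_index?_eq_some hj with ⟨hjlt, hjval, hjmin⟩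
  have hji : j ≤ i := by
    by_contra hlt
    exact hjmin i (by omega) rfl
  have h2 : ((PySem.List.enumerate lst 0).foldl
        (fun (d : PySem.Dict Int Int) p => d.setdefault p.2 p.1) PySem.Dict.empty).get? lst[i]
      = some ((j : Nat) : Int) := by
    rw [fdi_get?_setdefault_fold lst 0 PySem.Dict.empty lst[i], hj]
    simp [PySem.Dict.empty, PySem.Dict.get?]
  rw [h2]
  by_cases hcase : j = i
  · subst hcase
    have hnot : lst[j] ∉ lst.take j := by
      intro hm
      rcases List.mem_iff_getElem.1 hm with ⟨k, hk, hkv⟩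
      have hk' : k < j := by simp only [List.length_take] at hk; omega
      exact hjmin k hk' (by rw [← hkv]; exact (List.getElem_take).symm)
    simp [hnot]
  · have hlt : j < i := by omega
    have hin : lst[i] ∈ lst.take i := by
      apply List.mem_iff_getElem.2
      exact ⟨j, by simp only [List.length_take]; omega, by rw [List.getElem_take]; rw [hjval]⟩
    have hne : ((j : Nat) : Int) ≠ ((i : Nat) : Int) := by
      exact_mod_cast hcase
    simp [hin, hne]

-- ===== VERDICT (by name: the statement is the Claim_ definition above) =====
theorem find_duplicate_indices_spec : Claim_equal_find_duplicate_indices := by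
  intro lst _
  unfold Spec_find_duplicate_indices find_duplicate_indices find_duplicate_indices_alt
  have h := fdi_foldl_eq lst [] PySem.Set.empty [] (by intro y; simp [PySem.Set.contains, PySem.Set.empty])
  simp only [List.length_nil, Int.natCast_zero, Int.sub_zero, List.nil_append] at h
  rw [h]
  congr 1
  apply List.filter_congr
  intro p hp
  rcases (PySem.List.mem_enumerate_iff _ _ _).1 hp with ⟨k, hk, rfl⟩
  simp only [zero_add]
  rw [PySem.List.slice_to_natCast]
  exact (fdi_cond_eq lst k hk).symm
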